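-- pv_equiv track=rewrite | github.com/davegallant/coding_challenges | coding_challenges/powerset.py | get_powerset_recursive
-- ===== SOURCE A (Python) =====
-- from typing import List
--
-- def get_powerset_recursive(nums: List[int]) -> List[List[int]]:
--
--     if not nums:
--         return [[]]
--
--     prefix = get_powerset_recursive(nums[:-1])
--
--     sets = []
--     for pre in prefix:
--         sets += [pre + [nums[-1]]]
--     # sets = [pre + [nums[-1]] for pre in prefix]
--     return prefix + sets
-- ===== SOURCE B (Python) =====
-- from typing import List
--
-- def get_powerset_recursive(nums: List[int]) -> List[List[int]]:
--     result = [[]]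
--     for x in nums:
--         result = result + [subset + [x] for subset in result]
--     return result
-- ===== Notes on version B (the rewrite author's own statement) =====
-- stated objective: simpler
-- what changed: Replaces the recursion on nums[:-1] (with slicing and an explicit inner accumulation loop) by a single iterative left-to-right pass maintaining the accumulated powerset.
import Mathlib
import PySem

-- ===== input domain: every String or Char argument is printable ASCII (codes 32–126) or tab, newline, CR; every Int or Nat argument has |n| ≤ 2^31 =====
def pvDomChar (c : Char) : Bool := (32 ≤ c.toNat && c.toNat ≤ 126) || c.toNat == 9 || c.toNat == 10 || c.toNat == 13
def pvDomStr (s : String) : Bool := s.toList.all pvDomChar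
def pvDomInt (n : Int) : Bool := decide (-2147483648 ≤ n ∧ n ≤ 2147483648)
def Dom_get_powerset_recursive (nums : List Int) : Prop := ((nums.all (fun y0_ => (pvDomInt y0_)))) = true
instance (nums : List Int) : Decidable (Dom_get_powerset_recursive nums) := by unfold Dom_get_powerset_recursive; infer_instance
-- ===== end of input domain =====

-- B replaces A's right-recursion (nums[:-1] slice + inner accumulation loop) by one
-- iterative left-to-right fold maintaining the accumulated powerset (objective: simpler).

-- ===== PORT A =====
-- A recurses on nums[:-1] (dropLast) and extends each prefix subset by nums[-1] via an
-- explicit accumulator loop ('sets += [pre + [nums[-1]]]' = foldl appending singletons).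
def get_powerset_recursive (nums : List Int) : List (List Int) :=
  if h : nums = [] then [[]]
  else
    let pfx := get_powerset_recursive nums.dropLast
    let sets := pfx.foldl (fun sets pre => sets ++ [pre ++ [nums.getLast h]]) []
    pfx ++ sets
termination_by nums.length
decreasing_by simpa using Nat.sub_lt (Nat.pos_of_ne_zero (by simpa using h)) Nat.one_pos

-- ===== PORT B =====
def get_powerset_recursive_alt (nums : List Int) : List (List Int) :=
  nums.foldl (fun result x => result ++ result.map (fun s => s ++ [x])) [[]]

-- ===== PRECONDITION & SPEC =====
def Spec_get_powerset_recursive (nums : List Int) (out : List (List Int)) : Prop := out = get_powerset_recursive_alt nums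
instance (nums : List Int) (out : List (List Int)) : Decidable (Spec_get_powerset_recursive nums out) := by unfold Spec_get_powerset_recursive; infer_instance

-- ===== CLAIM (what is proved, stated in full; the proofs are below) =====
def Claim_equal_get_powerset_recursive : Prop := ∀ (nums : List Int), Dom_get_powerset_recursive nums → Spec_get_powerset_recursive nums (get_powerset_recursive nums)

-- ===== LEMMAS AND PROOFS =====

-- A's inner accumulator loop is a map.
lemma foldl_append_singleton (l : List (List Int)) (x : Int) (acc : List (List Int)) :
    l.foldl (fun sets pre => sets ++ [pre ++ [x]]) acc = acc ++ l.map (fun pre => pre ++ [x]) := by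
  induction l generalizing acc with
  | nil => simp
  | cons p t ih => simp [List.foldl, ih, List.append_assoc]

lemma portA_snoc (l : List Int) (x : Int) :
    get_powerset_recursive (l ++ [x]) =
      get_powerset_recursive l ++ (get_powerset_recursive l).map (fun pre => pre ++ [x]) := by
  rw [get_powerset_recursive]
  simp only [List.append_ne_nil_of_right_ne_nil _ (by simp : ([x]:List Int) ≠ []), dite_false,
    List.dropLast_concat, foldl_append_singleton, List.nil_append]
  simp [List.getLast_concat]

lemma ports_agree (nums : List Int) :
    get_powerset_recursive nums = get_powerset_recursive_alt nums := by
  unfold get_powerset_recursive_alt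
  induction nums using List.reverseRecOn with
  | nil => rw [get_powerset_recursive]; simp
  | append_singleton l x ih =>
      rw [portA_snoc, ih]
      simp

-- ===== VERDICT (by name: the statement is the Claim_ definition above) =====
theorem get_powerset_recursive_spec : Claim_equal_get_powerset_recursive := by
  intro nums _
  exact ports_agree nums
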